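-- pv_equiv track=rewrite | github.com/Melodiz/CodeRun | Algorithms/Hard/587_frequency_limitation/solution.py | solve_for_Y
-- ===== SOURCE A (Python) =====
-- def solve_for_Y(Y, queries):
--     last_query_time = -float('inf')
--     responses_time = []
--     for query_time in queries:
--         if query_time - last_query_time >= Y:
--             responses_time.append(query_time)
--             last_query_time = query_time
--         else:
--             responses_time.append(last_query_time + Y)
--             last_query_time += Y
--     return responses_time
-- ===== SOURCE B (Python) =====
-- def _prefix_max(xs):
--     if not xs:
--         return []
--     m = xs[0]
--     out = [m]
--     for x in xs[1:]:
--         if x > m: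
--             m = x
--         out.append(m)
--     return out
--
-- def solve_for_Y(Y, queries):
--     # Change of coordinates: response_i = i*Y + max_{j<=i} (queries[j] - j*Y),
--     # so the problem reduces to a plain prefix-maximum of a shifted list.
--     shifted = [q - i * Y for i, q in enumerate(queries)]
--     best = _prefix_max(shifted)
--     return [m + i * Y for i, m in enumerate(best)]
-- ===== Notes on version B (the rewrite author's own statement) =====
-- stated objective: alternative
-- what changed: Replaces A's single branchy running-state loop by a change of coordinates in three staged passes: shift each query by -i*Y, take a plain prefix-maximum of the shifted list, then shift back by +i*Y (response_i = i*Y + max_{j<=i}(q_j - j*Y)).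
import Mathlib
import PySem

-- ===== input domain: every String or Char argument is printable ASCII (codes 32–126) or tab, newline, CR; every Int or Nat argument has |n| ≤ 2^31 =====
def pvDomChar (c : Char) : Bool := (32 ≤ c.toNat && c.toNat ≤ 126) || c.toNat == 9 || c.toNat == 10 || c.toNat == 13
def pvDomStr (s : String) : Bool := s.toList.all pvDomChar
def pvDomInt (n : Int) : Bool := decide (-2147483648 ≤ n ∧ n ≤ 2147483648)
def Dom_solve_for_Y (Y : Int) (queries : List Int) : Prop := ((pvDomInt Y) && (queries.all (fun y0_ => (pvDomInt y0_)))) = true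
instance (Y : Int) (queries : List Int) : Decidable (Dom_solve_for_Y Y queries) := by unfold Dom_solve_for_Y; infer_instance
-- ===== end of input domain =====

-- B replaces A's branchy running-state loop by a change of coordinates
-- (response_i = i*Y + max_{j≤i}(q_j - j*Y)): shift, plain prefix-maximum, shift back;
-- objective: alternative decomposition in staged passes, same O(n) cost.


-- ===== PORT A =====
-- last_query_time starts at -float('inf'); we model it as Option Int with
-- none = -inf, on which 'query_time - last >= Y' is always true (exact: all
-- other values involved are finite ints).
def solve_for_Y (Y : Int) (queries : List Int) : List Int :=
  (queries.foldl
    (fun (st : Option Int × List Int) query_time =>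
      match st with
      | (none, acc) => (some query_time, acc ++ [query_time])
      | (some last, acc) =>
        if query_time - last ≥ Y then (some query_time, acc ++ [query_time])
        else (some (last + Y), acc ++ [last + Y]))
    (none, [])).2

-- ===== PORT B =====
-- _prefix_max: first element kept, then running maximum carried through the tail.
def prefMaxGo (m : Int) : List Int → List Int
  | [] => []
  | x :: r =>
    let m' := if x > m then x else m
    m' :: prefMaxGo m' r

def prefix_max : List Int → List Int
  | [] => []
  | x :: r => x :: prefMaxGo x r

def solve_for_Y_alt (Y : Int) (queries : List Int) : List Int :=
  let shifted := (PySem.List.enumerate queries).map (fun p => p.2 - p.1 * Y)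
  let best := prefix_max shifted
  (PySem.List.enumerate best).map (fun p => p.2 + p.1 * Y)

-- ===== PRECONDITION & SPEC =====
def Spec_solve_for_Y (Y : Int) (queries : List Int) (out : List Int) : Prop := out = solve_for_Y_alt Y queries
instance (Y : Int) (queries : List Int) (out : List Int) : Decidable (Spec_solve_for_Y Y queries out) := by unfold Spec_solve_for_Y; infer_instance

-- ===== CLAIM (what is proved, stated in full; the proofs are below) =====
def Claim_equal_solve_for_Y : Prop := ∀ (Y : Int) (queries : List Int), Dom_solve_for_Y Y queries → Spec_solve_for_Y Y queries (solve_for_Y Y queries)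

-- ===== LEMMAS AND PROOFS =====

-- Common reference scan: next response = max(query, last + Y).
def accumMax (Y : Int) (last : Int) : List Int → List Int
  | [] => []
  | q :: rest =>
    let n := max q (last + Y)
    n :: accumMax Y n rest

-- A's loop from a finite last value appends exactly the reference scan.
theorem foldl_some_eq_accumMax (Y : Int) (rest : List Int) :
    ∀ (last : Int) (acc : List Int),
      (rest.foldl
        (fun (st : Option Int × List Int) query_time =>
          match st with
          | (none, acc) => (some query_time, acc ++ [query_time])
          | (some last, acc) =>
            if query_time - last ≥ Y then (some query_time, acc ++ [query_time])
            else (some (last + Y), acc ++ [last + Y]))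
        (some last, acc)).2 = acc ++ accumMax Y last rest := by
  induction rest with
  | nil => intro last acc; simp [accumMax]
  | cons q rest ih =>
    intro last acc
    simp only [List.foldl_cons, accumMax]
    by_cases h : q - last ≥ Y
    · have hmax : max q (last + Y) = q := by omega
      simp [h, hmax, ih]
    · have hmax : max q (last + Y) = last + Y := by omega
      simp [h, hmax, ih]

-- B's shift / prefix-max / unshift pipeline on the tail equals the reference scan.
theorem go_eq_accumMax (Y : Int) (rest : List Int) :
    ∀ (s m : Int),
      (PySem.List.enumerate
          (prefMaxGo m ((PySem.List.enumerate rest s).map (fun p => p.2 - p.1 * Y))) s).map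
          (fun p => p.2 + p.1 * Y)
        = accumMax Y (m + (s - 1) * Y) rest := by
  induction rest with
  | nil => intro s m; simp [PySem.List.enumerate_nil, prefMaxGo, accumMax]
  | cons q r ih =>
    intro s m
    simp only [PySem.List.enumerate_cons, List.map_cons, prefMaxGo, accumMax]
    by_cases h : q - s * Y > m
    · have hmax : max q (m + (s - 1) * Y + Y) = (q - s * Y) + s * Y := by
        have : (s - 1) * Y + Y = s * Y := by ring
        omega
      simp only [if_pos h, ih]
      have hs : (s + 1 - 1) * Y = s * Y := by ring
      congr 1
      · omega
      · congr 1
        omega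
    · have hmax : max q (m + (s - 1) * Y + Y) = m + s * Y := by
        have : (s - 1) * Y + Y = s * Y := by ring
        omega
      simp only [if_neg h, ih]
      have hs : (s + 1 - 1) * Y = s * Y := by ring
      congr 1
      · omega
      · congr 1
        omega

-- ===== VERDICT (by name: the statement is the Claim_ definition above) =====
theorem solve_for_Y_spec : Claim_equal_solve_for_Y := by
  intro Y queries _
  unfold Spec_solve_for_Y solve_for_Y solve_for_Y_alt
  cases queries with
  | nil => simp [PySem.List.enumerate_nil, prefix_max]
  | cons q rest =>
    simp only [List.foldl_cons, PySem.List.enumerate_cons, List.map_cons, prefix_max,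
      PySem.List.enumerate_cons, List.map_cons]
    rw [foldl_some_eq_accumMax]
    have := go_eq_accumMax Y rest 1 (q - 0 * Y)
    simp only [List.nil_append, List.singleton_append]
    rw [show (0:Int)+1 = 1 from by norm_num, this]
    congr 1
    · omega
    · congr 1
      ring
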